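-- pv_equiv track=rewrite | github.com/lore-2001/AED1-IP | guia7.py | columnas_ordenadas
-- ===== SOURCE A (Python) =====
-- def ordenados (s:list[int]) -> bool:
--     res = True
--     for i in range (0,len(s)-1,1):
--         if not s[i] <s[i+1]:
--             res = False
--     return res
--
-- def columna (m:list[list[int]],c:int) -> list[int]:
--     res : list [int] = []
--     for fila in m:
--         res.append(fila[c])
--     return res
--
-- def columnas_ordenadas (m:list[list[int]]) -> list[bool]:
--     res : list[bool] = []
--     matriz_ordenada_por_columnas : list[list[int]] = []
--     for i in range(0,len(m[0]),1):
--         matriz_ordenada_por_columnas.append(columna(m,i))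
--     for column in matriz_ordenada_por_columnas:
--         if ordenados (column):
--             res.append(True)
--         else:
--             res.append(False)
--     return res
-- ===== SOURCE B (Python) =====
-- def columnas_ordenadas(m: list[list[int]]) -> list[bool]:
--     ncols = len(m[0])
--     res = [True] * ncols
--     for i in range(len(m) - 1):
--         fila, sig = m[i], m[i + 1]
--         for c in range(ncols):
--             if not fila[c] < sig[c]:
--                 res[c] = False
--     return res
-- ===== Notes on version B (the rewrite author's own statement) =====
-- stated objective: simpler
-- what changed: Replaces A's build-every-transposed-column-then-scan-each-column structure with a single row-major pass over consecutive row pairs that updates a per-column boolean accumulator, eliminating the transpose entirely.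
import Mathlib
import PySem

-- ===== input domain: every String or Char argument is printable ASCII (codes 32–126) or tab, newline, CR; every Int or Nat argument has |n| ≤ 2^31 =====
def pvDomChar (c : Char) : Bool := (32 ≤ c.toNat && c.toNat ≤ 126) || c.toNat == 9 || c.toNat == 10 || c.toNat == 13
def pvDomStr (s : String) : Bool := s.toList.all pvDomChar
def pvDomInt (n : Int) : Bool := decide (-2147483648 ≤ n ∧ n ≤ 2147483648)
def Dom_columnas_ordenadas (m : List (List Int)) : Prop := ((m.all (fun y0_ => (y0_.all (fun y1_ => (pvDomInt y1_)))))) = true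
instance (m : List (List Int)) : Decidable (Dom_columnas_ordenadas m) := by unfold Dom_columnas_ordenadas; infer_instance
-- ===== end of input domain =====

-- B replaces A's transpose-then-scan-each-column structure with a single row-major
-- pass over consecutive row pairs that maintains a per-column boolean accumulator.

-- ===== PORT A =====
def pvOrdenados (s : List Int) : Bool :=
  (PySem.List.pyRange 0 ((s.length : Int) - 1) 1).foldl
    (fun res i =>
      if ¬ (PySem.List.pyGetD s i 0 < PySem.List.pyGetD s (i + 1) 0) then false else res) true

def pvColumna (m : List (List Int)) (c : Int) : List Int :=
  m.foldl (fun res fila => res ++ [PySem.List.pyGetD fila c 0]) []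

def columnas_ordenadas (m : List (List Int)) : List Bool :=
  let mat : List (List Int) :=
    (PySem.List.pyRange 0 ((PySem.List.pyGetD m 0 []).length : Int) 1).foldl
      (fun acc i => acc ++ [pvColumna m i]) []
  mat.foldl (fun res column => if pvOrdenados column then res ++ [true] else res ++ [false]) []

-- ===== PORT B =====
def columnas_ordenadas_alt (m : List (List Int)) : List Bool :=
  let ncols : Nat := (PySem.List.pyGetD m 0 []).length
  (PySem.List.pyRange 0 ((m.length : Int) - 1) 1).foldl
    (fun res i =>
      let fila := PySem.List.pyGetD m i []
      let sig := PySem.List.pyGetD m (i + 1) []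
      (PySem.List.pyRange 0 (ncols : Int) 1).foldl
        (fun r c =>
          if ¬ (PySem.List.pyGetD fila c 0 < PySem.List.pyGetD sig c 0)
          then PySem.List.pySetD r c false else r) res)
    (List.replicate ncols true)

-- ===== PRECONDITION & SPEC =====
-- Pre_ excludes exactly the inputs on which Python A raises IndexError: the empty
-- matrix (m[0] fails) and matrices having a row shorter than the first row.
def Pre_columnas_ordenadas (m : List (List Int)) : Prop :=
  m ≠ [] ∧ ∀ r ∈ m, m.headI.length ≤ r.length
instance (m : List (List Int)) : Decidable (Pre_columnas_ordenadas m) := by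
  unfold Pre_columnas_ordenadas; infer_instance
def pvWitness_columnas_ordenadas : List (List Int) := [[1, 5], [2, 4], [3, 6]]

def Spec_columnas_ordenadas (m : List (List Int)) (out : List Bool) : Prop := out = columnas_ordenadas_alt m
instance (m : List (List Int)) (out : List Bool) : Decidable (Spec_columnas_ordenadas m out) := by unfold Spec_columnas_ordenadas; infer_instance

-- ===== CLAIM (what is proved, stated in full; the proofs are below) =====
def Claim_equal_columnas_ordenadas : Prop := ∀ (m : List (List Int)), Dom_columnas_ordenadas m → Pre_columnas_ordenadas m → Spec_columnas_ordenadas m (columnas_ordenadas m)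

-- ===== LEMMAS AND PROOFS =====

-- row i of m (the value both ports read through pyGetD with default [])
def pvRow (m : List (List Int)) (i : Nat) : List Int := m.getD i []

-- "column c is strictly increasing", as both ports compute it
def pvColOK (m : List (List Int)) (N c : Nat) : Bool :=
  (List.range N).all (fun i => decide ((pvRow m i).getD c 0 < (pvRow m (i + 1)).getD c 0))

-- the common normal form of both ports
def pvSpecList (m : List (List Int)) : List Bool :=
  (List.range (PySem.List.pyGetD m 0 []).length).map
    (fun c => pvColOK m (m.length - 1) c)

lemma foldl_if_false_all {α : Type} (P : α → Prop) [DecidablePred P] :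
    ∀ (l : List α) (b : Bool),
      l.foldl (fun r i => if ¬ P i then false else r) b = (b && l.all (fun i => decide (P i))) := by
  intro l
  induction l with
  | nil => intro b; simp
  | cons x xs ih =>
      intro b
      rw [List.foldl_cons, ih]
      by_cases h : P x
      · simp [h]
      · simp [h]

lemma getD_map_getD (m : List (List Int)) (c k : Nat) :
    ((m.map (fun fila => fila.getD c 0)).getD k 0) = (pvRow m k).getD c 0 := by
  by_cases h : k < m.length
  · simp [List.getD, pvRow, h]
  · have h1 : m[k]? = none := List.getElem?_eq_none_iff.mpr (by omega)
    have h2 : (m.map (fun fila => fila.getD c 0))[k]? = none :=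
      List.getElem?_eq_none_iff.mpr (by simpa using Nat.le_of_not_lt h)
    simp [List.getD, pvRow, h1]

lemma ordenados_columna (m : List (List Int)) (c : Nat) :
    pvOrdenados (pvColumna m (c : Int)) = pvColOK m (m.length - 1) c := by
  have hcol : pvColumna m (c : Int) = m.map (fun fila => fila.getD c 0) := by
    rw [pvColumna, PySem.List.foldl_append_singleton_eq_map]
    simp only [List.nil_append]
    exact List.map_congr_left (fun fila _ => by simp)
  rw [pvOrdenados, hcol]
  rw [foldl_if_false_all]
  rw [PySem.List.pyRange_one]
  simp only [Bool.true_and, List.all_map, List.length_map]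
  rw [pvColOK]
  have hN : ((m.length : Int) - 1 - 0).toNat = m.length - 1 := by omega
  rw [hN]
  refine List.all_congr rfl (fun i => ?_)
  have key : ∀ k : Nat, PySem.List.pyGetD (List.map (fun fila => fila.getD c 0) m) ((k : Nat) : Int) 0 = (pvRow m k).getD c 0 := by
    intro k
    rw [PySem.List.pyGetD_natCast]
    exact getD_map_getD m c k
  have e1 : ((0 : Int) + (i : Int)) = ((i : Nat) : Int) := by omega
  have e2 : ((i : Int) + 1) = (((i + 1 : Nat) : Nat) : Int) := by omega
  simp only [Function.comp_apply]
  rw [e1, e2, key i, key (i + 1)]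

lemma portA_eq_spec (m : List (List Int)) : columnas_ordenadas m = pvSpecList m := by
  rw [columnas_ordenadas]
  have hmat : (PySem.List.pyRange 0 ((PySem.List.pyGetD m 0 []).length : Int) 1).foldl
      (fun acc i => acc ++ [pvColumna m i]) []
      = (List.range (PySem.List.pyGetD m 0 []).length).map (fun k : Nat => pvColumna m (k : Int)) := by
    rw [PySem.List.foldl_append_singleton_eq_map, PySem.List.pyRange_one, List.map_map]
    have h0 : (((PySem.List.pyGetD m 0 []).length : Int) - 0).toNat = (PySem.List.pyGetD m 0 []).length := by omega
    rw [h0, List.nil_append]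
    exact List.map_congr_left (fun k _ => by norm_num)
  have hbody : (fun (res : List Bool) column =>
      if pvOrdenados column then res ++ [true] else res ++ [false])
      = (fun (res : List Bool) column => res ++ [pvOrdenados column]) := by
    funext res column
    by_cases h : pvOrdenados column <;> simp_all
  simp only [hmat, hbody]
  rw [PySem.List.foldl_append_singleton_eq_map, List.nil_append, List.map_map, pvSpecList]
  exact List.map_congr_left (fun c _ => ordenados_columna m c)

lemma innerFold_length (Q : Nat → Prop) [DecidablePred Q] :
    ∀ (l : List Nat) (res : List Bool),
      (l.foldl (fun r c => if ¬ Q c then r.set c false else r) res).length = res.length := by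
  intro l
  induction l with
  | nil => intro res; simp
  | cons x xs ih =>
      intro res
      rw [List.foldl_cons]
      by_cases h : Q x
      · rw [if_neg (by simpa using h)]; exact ih res
      · rw [if_pos (by simpa using h)]
        rw [ih (res.set x false)]
        exact List.length_set ..

lemma innerFold_getD (Q : Nat → Prop) [DecidablePred Q] :
    ∀ (n : Nat) (res : List Bool) (c : Nat), c < res.length →
      ((List.range n).foldl (fun r c => if ¬ Q c then r.set c false else r) res).getD c true
        = if c < n ∧ ¬ Q c then false else res.getD c true := by
  intro n
  induction n with
  | zero => intro res c hc; simp
  | succ n ih =>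
      intro res c hc
      rw [List.range_succ, List.foldl_append, List.foldl_cons, List.foldl_nil]
      have hFlen : ((List.range n).foldl (fun r c => if ¬ Q c then r.set c false else r) res).length = res.length :=
        innerFold_length Q _ res
      by_cases hq : Q n
      · rw [if_neg (by simpa using hq)]
        rw [ih res c hc]
        by_cases hcn : c < n
        · have : c < n + 1 := by omega
          simp [hcn, this]
        · by_cases hce : c = n
          · simp [hce, hq]
          · have h2 : ¬ c < n + 1 := by omega
            simp [hcn, h2]
      · rw [if_pos (by simpa using hq)]
        by_cases hce : c = n
        · subst hce
          have hclt : c < ((List.range c).foldl (fun r c => if ¬ Q c then r.set c false else r) res).length := by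
            rw [innerFold_length Q _ res]; exact hc
          have hlt1 : c < c + 1 := by omega
          rw [if_pos (⟨hlt1, hq⟩ : c < c + 1 ∧ ¬ Q c)]
          rw [List.getD_eq_getElem _ _ (by simpa using hclt), List.getElem_set_self]
        · have hgd : (((List.range n).foldl (fun r c => if ¬ Q c then r.set c false else r) res).set n false).getD c true
              = ((List.range n).foldl (fun r c => if ¬ Q c then r.set c false else r) res).getD c true := by
            simp [List.getD, List.getElem?_set_ne (fun h => hce h.symm)]
          rw [hgd, ih res c hc]
          by_cases hcn : c < n
          · have : c < n + 1 := by omega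
            simp [hcn, this]
          · have h2 : ¬ c < n + 1 := by omega
            simp [hcn, h2]

def pvOuter (m : List (List Int)) (ncols N : Nat) : List Bool :=
  (List.range N).foldl
    (fun res i =>
      (List.range ncols).foldl
        (fun r c =>
          if ¬ ((pvRow m i).getD c 0 < (pvRow m (i + 1)).getD c 0) then r.set c false else r) res)
    (List.replicate ncols true)

lemma pvOuter_length (m : List (List Int)) (ncols N : Nat) :
    (pvOuter m ncols N).length = ncols := by
  induction N with
  | zero => simp [pvOuter]
  | succ N ih =>
      rw [pvOuter, List.range_succ, List.foldl_append, List.foldl_cons, List.foldl_nil]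
      rw [innerFold_length (fun c => (pvRow m N).getD c 0 < (pvRow m (N + 1)).getD c 0) (List.range ncols)]
      exact ih

lemma pvOuter_getD (m : List (List Int)) (ncols : Nat) :
    ∀ (N : Nat) (c : Nat), c < ncols →
      (pvOuter m ncols N).getD c true = pvColOK m N c := by
  intro N
  induction N with
  | zero =>
      intro c hc
      rw [pvOuter, pvColOK]
      simp
  | succ N ih =>
      intro c hc
      rw [pvOuter, List.range_succ, List.foldl_append, List.foldl_cons, List.foldl_nil]
      rw [show ((List.range N).foldl _ (List.replicate ncols true)) = pvOuter m ncols N from rfl]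
      rw [innerFold_getD (fun c => (pvRow m N).getD c 0 < (pvRow m (N + 1)).getD c 0)
        ncols (pvOuter m ncols N) c (by rw [pvOuter_length]; exact hc)]
      rw [pvColOK, List.range_succ, List.all_append]
      have hIH : (pvOuter m ncols N).getD c true = pvColOK m N c := ih c hc
      by_cases hq : (pvRow m N).getD c 0 < (pvRow m (N + 1)).getD c 0
      · rw [if_neg (fun h => h.2 hq)]
        rw [hIH]
        have hlast : ([N].all fun i => decide ((pvRow m i).getD c 0 < (pvRow m (i + 1)).getD c 0)) = true := by
          simpa [List.getD_eq_getElem?_getD] using hq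
        rw [hlast, Bool.and_true, pvColOK]
      · rw [if_pos ⟨hc, hq⟩]
        have hlast : ([N].all fun i => decide ((pvRow m i).getD c 0 < (pvRow m (i + 1)).getD c 0)) = false := by
          simpa [List.getD_eq_getElem?_getD] using hq
        rw [hlast, Bool.and_false]

lemma portB_eq_spec (m : List (List Int)) : columnas_ordenadas_alt m = pvSpecList m := by
  rw [columnas_ordenadas_alt]
  have houter : (PySem.List.pyRange 0 ((m.length : Int) - 1) 1).foldl
      (fun res i =>
        let fila := PySem.List.pyGetD m i []
        let sig := PySem.List.pyGetD m (i + 1) []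
        (PySem.List.pyRange 0 (((PySem.List.pyGetD m 0 []).length : Nat) : Int) 1).foldl
          (fun r c =>
            if ¬ (PySem.List.pyGetD fila c 0 < PySem.List.pyGetD sig c 0)
            then PySem.List.pySetD r c false else r) res)
      (List.replicate (PySem.List.pyGetD m 0 []).length true)
      = pvOuter m (PySem.List.pyGetD m 0 []).length (m.length - 1) := by
    rw [PySem.List.pyRange_one 0 ((m.length : Int) - 1), List.foldl_map, pvOuter]
    have hN : ((m.length : Int) - 1 - 0).toNat = m.length - 1 := by omega
    rw [hN]
    apply PySem.List.foldl_congr_mem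
    intro res i _
    simp only
    rw [PySem.List.pyRange_one 0 (((PySem.List.pyGetD m 0 []).length : Nat) : Int), List.foldl_map]
    have h0 : ((((PySem.List.pyGetD m 0 []).length : Nat) : Int) - 0).toNat = (PySem.List.pyGetD m 0 []).length := by omega
    rw [h0]
    apply PySem.List.foldl_congr_mem
    intro r c _
    have e1 : ((0 : Int) + (i : Int)) = ((i : Nat) : Int) := by omega
    have e2 : ((i : Int) + 1) = (((i + 1 : Nat) : Nat) : Int) := by omega
    have e3 : ((0 : Int) + (c : Int)) = ((c : Nat) : Int) := by omega
    rw [e1, e3, e2]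
    simp only [PySem.List.pyGetD_natCast, PySem.List.pySetD_natCast, pvRow]
    rfl
  rw [houter]
  apply List.ext_getElem
  · rw [pvOuter_length]
    simp [pvSpecList]
  · intro c h1 h2
    have hc : c < (PySem.List.pyGetD m 0 []).length := by
      rwa [pvOuter_length] at h1
    have hgd := pvOuter_getD m (PySem.List.pyGetD m 0 []).length (m.length - 1) c hc
    rw [List.getD_eq_getElem _ _ h1] at hgd
    simp only [pvSpecList, List.getElem_map, List.getElem_range]
    exact hgd

-- ===== VERDICT (by name: the statement is the Claim_ definition above) =====
theorem columnas_ordenadas_spec : Claim_equal_columnas_ordenadas := by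
  intro m _ _
  unfold Spec_columnas_ordenadas
  rw [portA_eq_spec, portB_eq_spec]
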